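-- pv_equiv track=rewrite | github.com/RafaelPenhas/EP2_RP | funcoes.py | calcula_pontos_quina
-- ===== SOURCE A (Python) =====
-- def calcula_pontos_quina(lista):
--
--   dicio = {}
--   soma = 0
--   n = 0
--
--   for i in range(len(lista)):
--     if lista[i] not in dicio:
--       dicio[lista[i]] = 1
--
--     else:
--       dicio[lista[i]] += 1
--
--   for num, qnt in dicio.items():
--     if qnt >= 5:
--       n = 1
--
--   if n == 1:
--     return 50
--
--   else:
--     return 0
-- ===== SOURCE B (Python) =====
-- def calcula_pontos_quina(lista):
--   run = 0
--   prev = None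
--   for v in sorted(lista):
--     if run and v == prev:
--       run += 1
--       if run == 5:
--         return 50
--     else:
--       prev = v
--       run = 1
--   return 0
-- ===== Notes on version B (the rewrite author's own statement) =====
-- stated objective: alternative
-- what changed: Replaces the frequency-dictionary build plus value scan by sorting the list and making one run-length pass that returns 50 as soon as five equal consecutive values are seen.
import Mathlib
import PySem

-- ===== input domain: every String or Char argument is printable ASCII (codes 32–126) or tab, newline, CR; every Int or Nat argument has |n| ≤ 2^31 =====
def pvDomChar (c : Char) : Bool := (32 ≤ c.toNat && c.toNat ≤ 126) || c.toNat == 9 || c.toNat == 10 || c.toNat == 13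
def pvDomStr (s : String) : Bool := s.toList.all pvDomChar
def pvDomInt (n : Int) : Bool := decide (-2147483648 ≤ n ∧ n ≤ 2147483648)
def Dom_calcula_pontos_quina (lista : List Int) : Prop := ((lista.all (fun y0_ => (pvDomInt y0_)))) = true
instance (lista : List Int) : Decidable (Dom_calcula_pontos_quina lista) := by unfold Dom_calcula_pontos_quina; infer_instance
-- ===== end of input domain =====

-- B sorts the list and makes one run-length pass with an early exit, instead of A's
-- frequency-dictionary build followed by a scan of its values (alternative algorithm; same cost class).

-- ===== PORT A =====
-- body of A's first loop: if lista[i] not in dicio: dicio[lista[i]] = 1 else: dicio[lista[i]] += 1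
def pvALoop (d : PySem.Dict Int Int) (x : Int) : PySem.Dict Int Int :=
  if ¬ d.contains x then d.insert x 1 else d.insert x (d.getD x 0 + 1)

def calcula_pontos_quina (lista : List Int) : Int :=
  -- dicio = {}; for i in range(len(lista)): …
  let dicio : PySem.Dict Int Int :=
    (PySem.List.pyRange 0 (PySem.List.len lista) 1).foldl
      (fun d i => pvALoop d (PySem.List.pyGetD lista i 0)) PySem.Dict.empty
  -- n = 0; for num, qnt in dicio.items(): if qnt >= 5: n = 1
  let n : Int := dicio.items.foldl (fun n kv => if 5 ≤ kv.2 then 1 else n) 0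
  if n = 1 then 50 else 0

-- ===== PORT B =====
-- run = 0; prev = None
-- for v in sorted(lista):
--   if run and v == prev:  run += 1;  if run == 5: return 50
--   else: prev = v; run = 1
-- return 0
def pvBLoop : List Int → Option Int → Int → Int
  | [], _, _ => 0
  | v :: t, prev, run =>
    if run ≠ 0 ∧ some v = prev then
      (if run + 1 = 5 then 50 else pvBLoop t prev (run + 1))
    else pvBLoop t (some v) 1

def calcula_pontos_quina_alt (lista : List Int) : Int :=
  pvBLoop (PySem.List.sorted lista (fun x => x) false) none 0

-- ===== PRECONDITION & SPEC =====
def Spec_calcula_pontos_quina (lista : List Int) (out : Int) : Prop := out = calcula_pontos_quina_alt lista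
instance (lista : List Int) (out : Int) : Decidable (Spec_calcula_pontos_quina lista out) := by unfold Spec_calcula_pontos_quina; infer_instance

-- ===== CLAIM (what is proved, stated in full; the proofs are below) =====
def Claim_equal_calcula_pontos_quina : Prop := ∀ (lista : List Int), Dom_calcula_pontos_quina lista → Spec_calcula_pontos_quina lista (calcula_pontos_quina lista)

-- ===== LEMMAS AND PROOFS =====

-- A's items scan sets n to 1 exactly when some count is ≥ 5
lemma pv_items_fold (l : List (Int × Int)) (a : Int) :
    l.foldl (fun n kv => if 5 ≤ kv.2 then 1 else n) a
      = if (∃ kv ∈ l, 5 ≤ kv.2) then 1 else a := by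
  induction l generalizing a with
  | nil => simp
  | cons kv t ih =>
    simp only [List.foldl_cons, ih]
    by_cases h : 5 ≤ kv.2 <;> by_cases ht : (∃ p ∈ t, 5 ≤ p.2) <;> simp [h, ht]

-- characterisation of A: 50 iff some element occurs at least 5 times
lemma pv_A_char (lista : List Int) :
    calcula_pontos_quina lista
      = if (∃ x ∈ lista, 5 ≤ lista.count x) then 50 else 0 := by
  simp only [calcula_pontos_quina, PySem.List.len_eq]
  simp only [PySem.List.foldl_pyRange_zero_pyGetD' lista 0 pvALoop PySem.Dict.empty]
  have hfun : pvALoop = fun (d : PySem.Dict Int Int) x => d.insert x (d.getD x 0 + 1) := by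
    funext d x
    unfold pvALoop
    by_cases h : d.contains x
    · simp [h]
    · have h0 : d.getD x 0 = 0 := by
        have hn := (PySem.Dict.get?_eq_none_iff_contains d x).2 (by simpa using h)
        simp [PySem.Dict.getD, hn]
      simp [h, h0]
  simp only [hfun, PySem.Dict.foldl_insert_getD_add_one_eq_counter, PySem.Dict.items_counter,
    pv_items_fold]
  by_cases h : (∃ x ∈ lista, 5 ≤ lista.count x)
  · have hx : ∃ kv ∈ (PySem.Set.ofList lista).map (fun k => (k, (lista.count k : Int))), 5 ≤ kv.2 := by
      obtain ⟨x, hxm, hc⟩ := h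
      exact ⟨(x, (lista.count x : Int)),
        List.mem_map_of_mem ((PySem.Set.mem_ofList lista x).2 hxm), by simpa using (by exact_mod_cast hc : (5:Int) ≤ (lista.count x : Int))⟩
    rw [if_pos hx, if_pos (by norm_num), if_pos h]
  · have hx : ¬ ∃ kv ∈ (PySem.Set.ofList lista).map (fun k => (k, (lista.count k : Int))), 5 ≤ kv.2 := by
      rintro ⟨kv, hkv, h5⟩
      obtain ⟨k, hk, rfl⟩ := List.mem_map.1 hkv
      exact h ⟨k, (PySem.Set.mem_ofList lista k).1 hk, by exact_mod_cast (by simpa using h5 : (5:Int) ≤ (lista.count k : Int))⟩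
    rw [if_neg hx, if_neg (by norm_num), if_neg h]

-- the run-length scan over a sorted tail, with r copies of p already consumed
lemma pv_bLoop_key (s : List Int) : ∀ (p r : Int), s.Pairwise (· ≤ ·) → (∀ x ∈ s, p ≤ x) →
    1 ≤ r → r < 5 →
    pvBLoop s (some p) r
      = if (∃ x ∈ (List.replicate r.toNat p ++ s), 5 ≤ (List.replicate r.toNat p ++ s).count x)
        then 50 else 0 := by
  induction s with
  | nil =>
    intro p r _ _ h1 h5
    have hnone : ¬ ∃ x ∈ (List.replicate r.toNat p ++ ([] : List Int)),
        5 ≤ (List.replicate r.toNat p ++ ([] : List Int)).count x := by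
      rintro ⟨x, hx, hc⟩
      simp only [List.append_nil] at hx hc
      have hxp : x = p := List.eq_of_mem_replicate hx
      subst hxp
      rw [List.count_replicate_self] at hc
      omega
    rw [if_neg hnone]
    rfl
  | cons v t ih =>
    intro p r hpw hge h1 h5
    have hpw' : t.Pairwise (· ≤ ·) := hpw.of_cons
    have hvle : ∀ x ∈ t, v ≤ x := fun x hx => (List.pairwise_cons.1 hpw).1 x hx
    by_cases hvp : v = p
    · subst hvp
      have hcond : (r ≠ 0 ∧ some v = some v) := ⟨by omega, rfl⟩
      by_cases hr4 : r + 1 = 5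
      · have hex : ∃ x ∈ (List.replicate r.toNat v ++ v :: t),
            5 ≤ (List.replicate r.toNat v ++ v :: t).count x := by
          refine ⟨v, by simp, ?_⟩
          rw [List.count_append, List.count_replicate_self, List.count_cons_self]
          omega
        show (if (r ≠ 0 ∧ some v = some v) then
            (if r + 1 = 5 then (50 : Int) else pvBLoop t (some v) (r + 1))
          else pvBLoop t (some v) 1) = _
        rw [if_pos hcond, if_pos hr4, if_pos hex]
      · have hrw : List.replicate r.toNat v ++ v :: t
            = List.replicate (r + 1).toNat v ++ t := by
          have hnat : (r + 1).toNat = r.toNat + 1 := by omega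
          rw [hnat, List.replicate_succ', List.append_assoc]
          rfl
        have hih := ih v (r + 1) hpw' hvle (by omega) (by omega)
        show (if (r ≠ 0 ∧ some v = some v) then
            (if r + 1 = 5 then (50 : Int) else pvBLoop t (some v) (r + 1))
          else pvBLoop t (some v) 1) = _
        rw [if_pos hcond, if_neg hr4, hih, hrw]
    · have hcond : ¬ (r ≠ 0 ∧ some v = some p) := by
        rintro ⟨-, hs⟩
        exact hvp (by injection hs)
      have hnp : ∀ x ∈ v :: t, x ≠ p := by
        intro x hx
        have hpv : p < v := lt_of_le_of_ne (hge v (by simp)) (fun hh => hvp hh.symm)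
        rcases List.mem_cons.1 hx with rfl | hx'
        · exact fun hh => hvp hh
        · have := hvle x hx'
          intro hh
          omega
      have hcount : ∀ x ∈ v :: t,
          (List.replicate r.toNat p ++ v :: t).count x = (v :: t).count x := by
        intro x hx
        rw [List.count_append, List.count_replicate, if_neg ?_, Nat.zero_add]
        exact fun hh => hnp x hx (eq_of_beq hh).symm
      have hiff : (∃ x ∈ (List.replicate r.toNat p ++ v :: t),
            5 ≤ (List.replicate r.toNat p ++ v :: t).count x)
          ↔ (∃ x ∈ (v :: t), 5 ≤ (v :: t).count x) := by
        constructor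
        · rintro ⟨x, hx, hc⟩
          rcases List.mem_append.1 hx with hx' | hx'
          · exfalso
            have hxp : x = p := List.eq_of_mem_replicate hx'
            subst hxp
            rw [List.count_append, List.count_replicate_self,
              List.count_eq_zero_of_not_mem (fun hh => hnp x hh rfl)] at hc
            omega
          · exact ⟨x, hx', by rwa [hcount x hx'] at hc⟩
        · rintro ⟨x, hx, hc⟩
          exact ⟨x, List.mem_append_right _ hx, by rwa [hcount x hx]⟩
      have hih := ih v 1 hpw' hvle (by omega) (by omega)
      have hone : List.replicate (1 : Int).toNat v ++ t = v :: t := by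
        simp [List.replicate_one]
      rw [hone] at hih
      show (if (r ≠ 0 ∧ some v = some p) then
          (if r + 1 = 5 then (50 : Int) else pvBLoop t (some p) (r + 1))
        else pvBLoop t (some v) 1) = _
      rw [if_neg hcond, hih]
      by_cases h : (∃ x ∈ (v :: t), 5 ≤ (v :: t).count x)
      · rw [if_pos h, if_pos (hiff.2 h)]
      · rw [if_neg h, if_neg (fun hh => h (hiff.1 hh))]

lemma pv_bLoop_start (s : List Int) (hs : s.Pairwise (· ≤ ·)) :
    pvBLoop s none 0 = if (∃ x ∈ s, 5 ≤ s.count x) then 50 else 0 := by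
  cases s with
  | nil => simp [pvBLoop]
  | cons v t =>
    have hih := pv_bLoop_key t v 1 hs.of_cons
      (fun x hx => (List.pairwise_cons.1 hs).1 x hx) (by omega) (by omega)
    have hone : List.replicate (1 : Int).toNat v ++ t = v :: t := by
      simp [List.replicate_one]
    rw [hone] at hih
    show (if ((0 : Int) ≠ 0 ∧ some v = none) then
        (if (0 : Int) + 1 = 5 then (50 : Int) else pvBLoop t none (0 + 1))
      else pvBLoop t (some v) 1) = _
    rw [if_neg (by simp), hih]

-- ===== VERDICT (by name: the statement is the Claim_ definition above) =====
theorem calcula_pontos_quina_spec : Claim_equal_calcula_pontos_quina := by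
  intro lista _
  unfold Spec_calcula_pontos_quina calcula_pontos_quina_alt
  rw [pv_A_char,
    pv_bLoop_start _ (by simpa using PySem.List.sorted_pairwise lista (fun x => x))]
  have hperm : (PySem.List.sorted lista (fun x => x) false).Perm lista :=
    PySem.List.sorted_perm lista (fun x => x) false
  by_cases h : (∃ x ∈ lista, 5 ≤ lista.count x)
  · obtain ⟨x, hx, hc⟩ := h
    have hx' : ∃ x ∈ PySem.List.sorted lista (fun x => x) false,
        5 ≤ (PySem.List.sorted lista (fun x => x) false).count x :=
      ⟨x, (PySem.List.mem_sorted lista (fun x => x) false x).2 hx, by rwa [hperm.count_eq]⟩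
    rw [if_pos ⟨x, hx, hc⟩, if_pos hx']
  · have hx' : ¬ ∃ x ∈ PySem.List.sorted lista (fun x => x) false,
        5 ≤ (PySem.List.sorted lista (fun x => x) false).count x := by
      rintro ⟨x, hx, hc⟩
      exact h ⟨x, (PySem.List.mem_sorted lista (fun x => x) false x).1 hx, by rwa [hperm.count_eq] at hc⟩
    rw [if_neg h, if_neg hx']
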